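-- pv_equiv track=rewrite | github.com/rossirm/Python | HackBulgaria/Programming0/exam/4-Cinema-Seats/cinema.py | order_of_seats
-- ===== SOURCE A (Python) =====
-- def row_to_fill(seats):
--     most_unoccupied = -1
--     row_most = -1
--     for row in range(0, len(seats)):
--         current_row_seats = 0
--         for seat in seats[row]:
--             current_row_seats += seat
--
--         if current_row_seats > most_unoccupied and current_row_seats != len(seats[row]):
--             most_unoccupied = current_row_seats
--             row_most = row
--     return row_most
--
-- def have_empty_seats(rows):
--     have_seats = False
--     for row in rows:
--         for seat in row:
--             if seat == 0:
--                 return True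
--     return have_seats
--
-- def order_of_seats(cinema):
--     order = []
--     while have_empty_seats(cinema):
--         next_row = row_to_fill(cinema)
--         for seat in range(len(cinema[next_row])):
--             if cinema[next_row][seat] == 0:
--                 cinema[next_row][seat] = 1
--                 order += [(next_row + 1, seat + 1)]
--
--     return order
-- ===== SOURCE B (Python) =====
-- def order_of_seats(cinema):
--     # Occupancy-count bucketing: compute each row's occupied-seat count once,
--     # then emit rows by descending count (ties: ascending row index) in one
--     # sweep per count level; the sweep starts at the highest occupancy among
--     # rows that still have an empty seat.  Unlike A, does not mutate `cinema`.
--     counts = [sum(row) for row in cinema]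
--     levels = [counts[i] for i, row in enumerate(cinema) if 0 in row]
--     order = []
--     for c in range(max(levels, default=0), -1, -1):
--         for i, row in enumerate(cinema):
--             if counts[i] == c and 0 in row:
--                 order.extend((i + 1, j + 1) for j, s in enumerate(row) if s == 0)
--     return order
-- ===== Notes on version B (the rewrite author's own statement) =====
-- stated objective: alternative
-- what changed: Replaces A's repeated whole-cinema rescans (a while loop that each round recomputes every row's occupancy to select the next row and mutates seats in place) with a single precomputation of per-row occupancy counts followed by one descending sweep over count levels that emits each row's empty positions, without mutating the input.
-- outside the precondition, e.g. on order_of_seats([[2, 0]]): A returns [(0, 2)], B returns [(1, 2)]; on order_of_seats([[0], [3]]): A does not finish within the time limit, B returns [(1, 1)]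
import Mathlib
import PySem

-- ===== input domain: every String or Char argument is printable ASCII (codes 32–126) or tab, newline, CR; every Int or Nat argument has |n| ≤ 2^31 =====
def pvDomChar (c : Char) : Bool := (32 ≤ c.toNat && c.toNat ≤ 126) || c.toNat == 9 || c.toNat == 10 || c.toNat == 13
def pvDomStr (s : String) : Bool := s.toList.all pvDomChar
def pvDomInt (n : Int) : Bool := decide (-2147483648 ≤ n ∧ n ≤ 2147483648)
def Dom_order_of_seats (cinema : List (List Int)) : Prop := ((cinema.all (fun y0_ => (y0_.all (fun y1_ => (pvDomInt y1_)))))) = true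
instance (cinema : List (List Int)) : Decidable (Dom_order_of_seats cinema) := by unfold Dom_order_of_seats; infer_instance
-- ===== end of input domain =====

-- B replaces A's repeated whole-cinema rescans with precomputed occupancy counts and one
-- descending sweep over count levels (objective: alternative); A mutates `cinema` in place while
-- B does not — the equivalence proved here is about the RETURN value only.

-- ===== PORT A =====
-- row_to_fill: for row in range(0, len(seats)): sum the row, keep the best (sum, row)
def rowToFill (seats : List (List Int)) : Int :=
  ((PySem.List.pyRange 0 (seats.length : Int) 1).foldl
    (fun (st : Int × Int) (row : Int) =>
      let cur := (PySem.List.pyGetD seats row []).foldl (fun a s => a + s) 0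
      if cur > st.1 ∧ cur ≠ ((PySem.List.pyGetD seats row []).length : Int)
      then (cur, row) else st)
    (-1, -1)).2

-- have_empty_seats: early-return True on the first 0 = any
def haveEmptySeats (rows : List (List Int)) : Bool :=
  rows.any (fun row => row.any (fun s => s == 0))

-- the body of A's inner `for seat in range(len(cinema[next_row]))` loop: walk the row,
-- set each 0 to 1 and record (next_row+1, seat+1)
def fillRowA (nr : Int) (j : Int) : List Int → List Int × List (Int × Int)
  | [] => ([], [])
  | s :: rest =>
    let p := fillRowA nr (j + 1) rest
    if s = 0 then (1 :: p.1, (nr + 1, j + 1) :: p.2) else (s :: p.1, p.2)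

-- the while loop, fuelled (inside Pre_ each iteration fills one row that has a 0,
-- so cinema.length + 1 rounds always reach the exit test)
def oosLoop : Nat → List (List Int) → List (Int × Int) → List (Int × Int)
  | 0, _, order => order
  | fuel + 1, cinema, order =>
    if haveEmptySeats cinema then
      let nr := rowToFill cinema
      let p := fillRowA nr 0 (PySem.List.pyGetD cinema nr [])
      oosLoop fuel (PySem.List.pySetD cinema nr p.1) (order ++ p.2)
    else order

def order_of_seats (cinema : List (List Int)) : List (Int × Int) :=
  oosLoop (cinema.length + 1) cinema []

-- ===== PORT B =====
def order_of_seats_alt (cinema : List (List Int)) : List (Int × Int) :=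
  let counts := cinema.map (fun row => row.sum)
  let levels := (PySem.List.enumerate cinema 0).filterMap
    (fun p => if (0 : Int) ∈ p.2 then some (PySem.List.pyGetD counts p.1 0) else none)
  let maxCount := PySem.List.maxD levels (fun x => x) 0
  (PySem.List.pyRange maxCount (-1) (-1)).flatMap (fun c =>
    (PySem.List.enumerate cinema 0).flatMap (fun p =>
      if PySem.List.pyGetD counts p.1 0 = c ∧ (0 : Int) ∈ p.2 then
        (PySem.List.enumerate p.2 0).filterMap
          (fun q => if q.2 = 0 then some (p.1 + 1, q.1 + 1) else none)
      else []))

-- ===== PRECONDITION & SPEC =====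
-- Pre_ admits the function's natural domain, 0/1 seat matrices, plus every cinema without
-- an empty seat (A returns [] at once there); it excludes only matrices mixing a 0 with
-- values other than 0/1, where A's sum-based selection, negative-index wraparound via row
-- -1 (returning 0-based tuples such as (0, 2)) and nontermination are accidents.
def Pre_order_of_seats (cinema : List (List Int)) : Prop :=
  (∀ row ∈ cinema, ∀ s ∈ row, s = 0 ∨ s = 1) ∨ (∀ row ∈ cinema, (0 : Int) ∉ row)
instance (cinema : List (List Int)) : Decidable (Pre_order_of_seats cinema) := by
  unfold Pre_order_of_seats; infer_instance
def pvWitness_order_of_seats : List (List Int) := [[1, 0], [0, 0], [1, 1]]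

def Spec_order_of_seats (cinema : List (List Int)) (out : List (Int × Int)) : Prop := out = order_of_seats_alt cinema
instance (cinema : List (List Int)) (out : List (Int × Int)) : Decidable (Spec_order_of_seats cinema out) := by unfold Spec_order_of_seats; infer_instance

-- ===== CLAIM (what is proved, stated in full; the proofs are below) =====
def Claim_equal_order_of_seats : Prop := ∀ (cinema : List (List Int)), Dom_order_of_seats cinema → Pre_order_of_seats cinema → Spec_order_of_seats cinema (order_of_seats cinema)

-- ===== LEMMAS AND PROOFS =====

-- abbreviations used only by the proofs
def preRow (row : List Int) : Prop := ∀ s ∈ row, s = 0 ∨ s = 1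

def zp (i : Int) (row : List Int) : List (Int × Int) :=
  (PySem.List.enumerate row 0).filterMap
    (fun q => if q.2 = 0 then some (i + 1, q.1 + 1) else none)

def fillR (row : List Int) : List Int := row.map (fun s => if s = 0 then 1 else s)

-- one count level of B: all rows whose occupancy is c, in index order
def emitL (cinema : List (List Int)) (c : Int) : List (Int × Int) :=
  (PySem.List.enumerate cinema 0).flatMap (fun p =>
    if p.2.sum = c ∧ (0 : Int) ∈ p.2 then zp p.1 p.2 else [])

-- the occupancies of the rows that still contain a 0
def levelsOf (cinema : List (List Int)) : List Int :=
  (PySem.List.enumerate cinema 0).filterMap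
    (fun p => if (0 : Int) ∈ p.2 then some p.2.sum else none)

lemma mem_enum {α : Type} {p : Int × α} {xs : List α} {s : Int}
    (h : p ∈ PySem.List.enumerate xs s) :
    ∃ (k : Nat) (hk : k < xs.length), p.1 = s + (k : Int) ∧ p.2 = xs[k] := by
  induction xs generalizing s with
  | nil => simp [PySem.List.enumerate] at h
  | cons x xs ih =>
    rw [PySem.List.enumerate_cons] at h
    simp only [List.mem_cons] at h
    rcases h with h | h
    · exact ⟨0, by simp, by simp [h]⟩
    · obtain ⟨k, hk, h1, h2⟩ := ih h
      refine ⟨k + 1, by simpa using hk, ?_, by simpa using h2⟩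
      push_cast
      omega

lemma enum_mem {α : Type} (xs : List α) (s : Int) (k : Nat) (hk : k < xs.length) :
    (s + (k : Int), xs[k]) ∈ PySem.List.enumerate xs s := by
  induction xs generalizing s k with
  | nil => simp at hk
  | cons x xs ih =>
    rw [PySem.List.enumerate_cons]
    cases k with
    | zero => simp
    | succ k =>
      right
      have := ih (s + 1) k (by simpa using hk)
      simpa [show s + 1 + (k : Int) = s + ((k : Int) + 1) by ring] using this

lemma enum_append {α : Type} (xs ys : List α) (s : Int) :
    PySem.List.enumerate (xs ++ ys) s
      = PySem.List.enumerate xs s ++ PySem.List.enumerate ys (s + xs.length) := by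
  induction xs generalizing s with
  | nil => simp [PySem.List.enumerate]
  | cons x xs ih =>
    rw [List.cons_append, PySem.List.enumerate_cons, PySem.List.enumerate_cons,
      List.cons_append, ih]
    have h2 : s + 1 + (xs.length : Int) = s + ((x :: xs).length : Int) := by
      simp only [List.length_cons]
      push_cast
      ring
    rw [h2]

-- 0/1 rows: sum bounds and "full ↔ no zero"
lemma row_sum_nonneg {row : List Int} (h : preRow row) : 0 ≤ row.sum := by
  induction row with
  | nil => simp
  | cons s rest ih =>
    have hs := h s (by simp)
    have := ih (fun x hx => h x (by simp [hx]))
    simp only [List.sum_cons]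
    omega

lemma row_sum_le_len {row : List Int} (h : preRow row) : row.sum ≤ (row.length : Int) := by
  induction row with
  | nil => simp
  | cons s rest ih =>
    have hs := h s (by simp)
    have := ih (fun x hx => h x (by simp [hx]))
    simp only [List.sum_cons, List.length_cons]
    push_cast
    omega

lemma row_sum_eq_len_iff {row : List Int} (h : preRow row) :
    row.sum = (row.length : Int) ↔ (0 : Int) ∉ row := by
  induction row with
  | nil => simp
  | cons s rest ih =>
    have hs := h s (by simp)
    have hrest : preRow rest := fun x hx => h x (by simp [hx])
    have hsum := row_sum_nonneg hrest
    have hlen := row_sum_le_len hrest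
    have := ih hrest
    simp only [List.sum_cons, List.length_cons, List.mem_cons]
    push_cast
    constructor
    · intro he hmem
      rcases hmem with hc | hc
      · omega
      · have hne : rest.sum ≠ (rest.length : Int) := fun hh => ((ih hrest).mp hh) hc
        rcases hs with h1 | h1 <;> omega
    · intro hne
      have h2 : (0 : Int) ∉ rest := fun hc => hne (Or.inr hc)
      have h3 : rest.sum = (rest.length : Int) := (ih hrest).mpr h2
      rcases hs with h1 | h1
      · exact absurd (Or.inl h1.symm) hne
      · omega

lemma fillRowA_eq (nr : Int) (row : List Int) : ∀ j : Int,
    fillRowA nr j row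
      = (fillR row, (PySem.List.enumerate row j).filterMap
          (fun q => if q.2 = 0 then some (nr + 1, q.1 + 1) else none)) := by
  induction row with
  | nil => intro j; simp [fillRowA, fillR, PySem.List.enumerate]
  | cons s rest ih =>
    intro j
    simp only [fillRowA, fillR, List.map_cons, PySem.List.enumerate_cons, List.filterMap_cons, ih]
    by_cases hs : s = 0 <;> simp [hs]

lemma zero_not_mem_fillR (row : List Int) : (0 : Int) ∉ fillR row := by
  intro hx
  simp only [fillR, List.mem_map] at hx
  obtain ⟨s, _, hv⟩ := hx
  by_cases hs : s = 0
  · simp [hs] at hv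
  · rw [if_neg hs] at hv
    exact hs hv

lemma preRow_fillR {row : List Int} (h : preRow row) : preRow (fillR row) := by
  intro x hx
  simp only [fillR, List.mem_map] at hx
  obtain ⟨s, hs, hv⟩ := hx
  rcases h s hs with h0 | h1
  · simp [h0] at hv; omega
  · simp [h1] at hv; omega


-- characterisation of row_to_fill on a 0/1 cinema with at least one empty seat:
-- the FIRST row of maximal occupancy among the rows containing a 0
lemma rowToFill_spec {cinema : List (List Int)} (hPre : ∀ row ∈ cinema, preRow row)
    (h : ∃ j, ∃ _ : j < cinema.length, (0 : Int) ∈ cinema.getD j []) :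
    ∃ m : Nat, rowToFill cinema = (m : Int) ∧ m < cinema.length ∧
      (0 : Int) ∈ cinema.getD m [] ∧
      (∀ j < cinema.length, (0 : Int) ∈ cinema.getD j [] →
        (cinema.getD j []).sum ≤ (cinema.getD m []).sum) ∧
      (∀ j < m, (0 : Int) ∈ cinema.getD j [] →
        (cinema.getD j []).sum < (cinema.getD m []).sum) := by
  set n := cinema.length with hn
  set F : Int × Int → Int → Int × Int := fun st row =>
    let cur := (PySem.List.pyGetD cinema row []).foldl (fun a s => a + s) 0
    if cur > st.1 ∧ cur ≠ ((PySem.List.pyGetD cinema row []).length : Int)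
    then (cur, row) else st with hF
  have hpre : ∀ t : Nat, t < n → preRow (cinema.getD t []) := by
    intro t ht s hs
    rw [List.getD_eq_getElem _ _ ht] at hs
    exact hPre _ (List.getElem_mem ht) s hs
  have hstep : ∀ (st : Int × Int) (t : Nat), t < n →
      F st (t : Int) = (if (cinema.getD t []).sum > st.1 ∧ (0 : Int) ∈ cinema.getD t []
        then ((cinema.getD t []).sum, (t : Int)) else st) := by
    intro st t ht
    have hiff : ((cinema.getD t []).sum ≠ ((cinema.getD t []).length : Int))
        ↔ (0 : Int) ∈ cinema.getD t [] := by
      rw [ne_eq, row_sum_eq_len_iff (hpre t ht)]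
      exact not_not
    simp only [hF, PySem.List.pyGetD_natCast, ← List.sum_eq_foldl]
    rw [if_congr (and_congr Iff.rfl hiff) rfl rfl]
  have inv : ∀ t : Nat, t ≤ n →
      ((PySem.List.pyRange 0 (t : Int) 1).foldl F (-1, -1) = (-1, -1)
        ∧ ∀ j < t, (0 : Int) ∉ cinema.getD j [])
      ∨ (∃ m, m < t ∧ (0 : Int) ∈ cinema.getD m [] ∧
          (PySem.List.pyRange 0 (t : Int) 1).foldl F (-1, -1)
            = ((cinema.getD m []).sum, (m : Int)) ∧
          (∀ j < t, (0 : Int) ∈ cinema.getD j [] →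
            (cinema.getD j []).sum ≤ (cinema.getD m []).sum) ∧
          (∀ j < m, (0 : Int) ∈ cinema.getD j [] →
            (cinema.getD j []).sum < (cinema.getD m []).sum)) := by
    intro t
    induction t with
    | zero =>
      intro _
      left
      refine ⟨?_, by omega⟩
      rw [show ((0 : Nat) : Int) = 0 by rfl, PySem.List.pyRange_one_eq_nil (le_refl 0)]
      rfl
    | succ t ih =>
      intro ht
      have ht' : t < n := by omega
      have hcast : ((t + 1 : Nat) : Int) = (t : Int) + 1 := by push_cast; ring
      rw [hcast, PySem.List.pyRange_one_succ_right (by positivity), List.foldl_append,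
        List.foldl_cons, List.foldl_nil, hstep _ t ht']
      rcases ih (by omega) with ⟨hst, hnone⟩ | ⟨m, hmt, hz, hst, hmax, hfirst⟩
      · rw [hst]
        by_cases h0 : (0 : Int) ∈ cinema.getD t []
        · have hge := row_sum_nonneg (hpre t ht')
          rw [if_pos ⟨by simpa using (by omega : -1 < (cinema.getD t []).sum), h0⟩]
          right
          refine ⟨t, by omega, h0, rfl, ?_, ?_⟩
          · intro j hj hzj
            rcases Nat.lt_succ_iff_lt_or_eq.mp hj with hj' | hj'
            · exact absurd hzj (hnone j hj')
            · rw [hj']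
          · intro j hj hzj
            exact absurd hzj (hnone j hj)
        · rw [if_neg (by tauto)]
          left
          refine ⟨rfl, ?_⟩
          intro j hj
          rcases Nat.lt_succ_iff_lt_or_eq.mp hj with hj' | hj'
          · exact hnone j hj'
          · rw [hj']; exact h0
      · rw [hst]
        by_cases hmem : (0 : Int) ∈ cinema.getD t []
        · by_cases hgt : (cinema.getD t []).sum > (cinema.getD m []).sum
          · rw [if_pos ⟨hgt, hmem⟩]
            right
            refine ⟨t, by omega, hmem, rfl, ?_, ?_⟩
            · intro j hj hzj
              rcases Nat.lt_succ_iff_lt_or_eq.mp hj with hj' | hj'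
              · have := hmax j hj' hzj
                omega
              · rw [hj']
            · intro j hj hzj
              have := hmax j (by omega) hzj
              omega
          · rw [if_neg (by tauto)]
            right
            refine ⟨m, by omega, hz, rfl, ?_, hfirst⟩
            intro j hj hzj
            rcases Nat.lt_succ_iff_lt_or_eq.mp hj with hj' | hj'
            · exact hmax j hj' hzj
            · rw [hj']; omega
        · rw [if_neg (by tauto)]
          right
          refine ⟨m, by omega, hz, rfl, ?_, hfirst⟩
          intro j hj hzj
          rcases Nat.lt_succ_iff_lt_or_eq.mp hj with hj' | hj'
          · exact hmax j hj' hzj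
          · rw [hj'] at hzj; exact absurd hzj hmem
  have hRT : rowToFill cinema = ((PySem.List.pyRange 0 (n : Int) 1).foldl F (-1, -1)).2 := rfl
  obtain ⟨j0, hj0, hz0⟩ := h
  rcases inv n (le_refl n) with ⟨_, hnone⟩ | ⟨m, hm, hz, hst, hmax, hfirst⟩
  · exact absurd hz0 (hnone j0 hj0)
  · exact ⟨m, by rw [hRT, hst], hm, hz, hmax, hfirst⟩

lemma haveEmptySeats_iff (cinema : List (List Int)) :
    haveEmptySeats cinema = true ↔ ∃ row ∈ cinema, (0 : Int) ∈ row := by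
  constructor
  · intro hh
    obtain ⟨row, hr, hz⟩ := List.any_eq_true.mp hh
    obtain ⟨s, hsr, hs⟩ := List.any_eq_true.mp hz
    exact ⟨row, hr, by rwa [(beq_iff_eq).mp hs] at hsr⟩
  · intro ⟨row, hr, hz⟩
    exact List.any_eq_true.mpr ⟨row, hr, List.any_eq_true.mpr ⟨0, hz, by simp⟩⟩

lemma mem_levelsOf {cinema : List (List Int)} {x : Int} :
    x ∈ levelsOf cinema ↔ ∃ k, ∃ _ : k < cinema.length,
      (0 : Int) ∈ cinema[k] ∧ x = (cinema[k]).sum := by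
  constructor
  · intro hx
    obtain ⟨p, hp, hsome⟩ := List.mem_filterMap.mp hx
    obtain ⟨k, hk, h1, h2⟩ := mem_enum hp
    by_cases hzp : (0 : Int) ∈ p.2
    · rw [if_pos hzp] at hsome
      exact ⟨k, hk, by rwa [← h2], by rw [← h2]; exact (Option.some_inj.mp hsome).symm⟩
    · rw [if_neg hzp] at hsome
      exact absurd hsome (by simp)
  · rintro ⟨k, hk, hz, hx⟩
    apply List.mem_filterMap.mpr
    refine ⟨((k : Int), cinema[k]), by simpa using enum_mem cinema 0 k hk, ?_⟩
    rw [if_pos hz, hx]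

lemma maxD_levels_nonneg {cinema : List (List Int)} (hPre : ∀ row ∈ cinema, preRow row) :
    0 ≤ PySem.List.maxD (levelsOf cinema) (fun x => x) 0 := by
  by_cases h : levelsOf cinema = []
  · rw [h, PySem.List.maxD_nil]
  · obtain ⟨k, hk, _, hx⟩ := mem_levelsOf.mp (PySem.List.maxD_mem (levelsOf cinema) (fun x => x) 0 h)
    rw [hx]
    exact row_sum_nonneg (fun s hs => hPre _ (List.getElem_mem hk) s hs)

lemma emitL_eq_nil_of_gt_max {cinema : List (List Int)} {c : Int}
    (hc : PySem.List.maxD (levelsOf cinema) (fun x => x) 0 < c) : emitL cinema c = [] := by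
  apply List.flatMap_eq_nil_iff.mpr
  intro p hp
  obtain ⟨k, hk, h1, h2⟩ := mem_enum hp
  rw [if_neg]
  rintro ⟨hsum, hzk⟩
  have hmem : c ∈ levelsOf cinema := mem_levelsOf.mpr ⟨k, hk, by rwa [← h2], by rw [← h2, hsum]⟩
  have := PySem.List.le_maxD_id (levelsOf cinema) 0 c hmem
  omega

lemma flatRange_ext (E : Int → List (Int × Int)) (N : Int) (hN : -1 ≤ N) :
    ∀ (M : Int), N ≤ M → (∀ c, N < c → E c = []) →
      (PySem.List.pyRange M (-1) (-1)).flatMap E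
        = (PySem.List.pyRange N (-1) (-1)).flatMap E := by
  intro M
  generalize hn : (M - N).toNat = n
  induction n generalizing M with
  | zero =>
    intro hNM _
    have : M = N := by omega
    rw [this]
  | succ n ih =>
    intro hNM hE
    have hlt : N < M := by omega
    rw [PySem.List.pyRange_neg_one_cons (by omega), List.flatMap_cons, hE M hlt,
      List.nil_append, ih (M - 1) (by omega) (by omega) hE]

lemma flatRange_eq (E : Int → List (Int × Int)) (M N : Int) (hM : -1 ≤ M) (hN : -1 ≤ N)
    (h : ∀ c, M < c → E c = []) (h' : ∀ c, N < c → E c = []) :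
    (PySem.List.pyRange M (-1) (-1)).flatMap E
      = (PySem.List.pyRange N (-1) (-1)).flatMap E := by
  by_cases hle : N ≤ M
  · exact flatRange_ext E N hN M hle h'
  · exact (flatRange_ext E M hM N (by omega) h).symm

-- B rewritten through emitL
lemma alt_eq (cinema : List (List Int)) :
    order_of_seats_alt cinema
      = (PySem.List.pyRange (PySem.List.maxD (levelsOf cinema) (fun x => x) 0)
          (-1) (-1)).flatMap (emitL cinema) := by
  simp only [order_of_seats_alt]
  have hlv : (PySem.List.enumerate cinema 0).filterMap
      (fun p => if (0 : Int) ∈ p.2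
        then some (PySem.List.pyGetD (cinema.map (fun row => row.sum)) p.1 0) else none)
      = levelsOf cinema := by
    apply List.filterMap_congr
    intro p hp
    obtain ⟨k, hk, h1, h2⟩ := mem_enum hp
    have h1' : p.1 = (k : Int) := by omega
    rw [h1', PySem.List.pyGetD_natCast, List.getD_eq_getElem _ _ (by simpa using hk),
      List.getElem_map, ← h2]
  rw [hlv]
  apply List.flatMap_congr
  intro c _
  apply List.flatMap_congr
  intro p hp
  obtain ⟨k, hk, h1, h2⟩ := mem_enum hp
  have h1' : p.1 = (k : Int) := by omega
  rw [h1', PySem.List.pyGetD_natCast, List.getD_eq_getElem _ _ (by simpa using hk),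
    List.getElem_map, ← h2]
  rfl

-- a descending sweep can start at any point above all the useful levels

lemma emitL_append_cons (pre : List (List Int)) (r : List Int) (suf : List (List Int)) (c : Int) :
    emitL (pre ++ r :: suf) c
      = (PySem.List.enumerate pre 0).flatMap
          (fun p => if p.2.sum = c ∧ (0 : Int) ∈ p.2 then zp p.1 p.2 else [])
        ++ (if r.sum = c ∧ (0 : Int) ∈ r then zp (pre.length : Int) r else [])
        ++ (PySem.List.enumerate suf ((pre.length : Int) + 1)).flatMap
          (fun p => if p.2.sum = c ∧ (0 : Int) ∈ p.2 then zp p.1 p.2 else []) := by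
  rw [emitL, enum_append, PySem.List.enumerate_cons, List.flatMap_append, List.flatMap_cons]
  simp only [zero_add, List.append_assoc]

lemma split_at {α : Type} (xs : List α) (m : Nat) (hm : m < xs.length) :
    xs = xs.take m ++ xs[m] :: xs.drop (m + 1) := by
  conv_lhs => rw [← List.take_append_drop m xs]
  rw [List.drop_eq_getElem_cons hm]

lemma set_split {α : Type} (xs : List α) (m : Nat) (y : α) (hm : m < xs.length) :
    xs.set m y = xs.take m ++ y :: xs.drop (m + 1) := by
  rw [List.set_eq_take_append_cons_drop, if_pos hm]

lemma emitL_set_of_agree {cinema : List (List Int)} {m : Nat} (hm : m < cinema.length)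
    (y : List Int) (c : Int)
    (hrow : (if (cinema[m]).sum = c ∧ (0 : Int) ∈ cinema[m] then zp (m : Int) cinema[m] else [])
      = (if y.sum = c ∧ (0 : Int) ∈ y then zp (m : Int) y else [])) :
    emitL (cinema.set m y) c = emitL cinema c := by
  have hlen : (cinema.take m).length = m := by
    rw [List.length_take]
    omega
  rw [set_split cinema m y hm, emitL_append_cons]
  conv_rhs => rw [split_at cinema m hm, emitL_append_cons]
  rw [hlen, ← hrow]

-- the core decomposition: B's list = first filled row's seats ++ B of the updated cinema
lemma alt_decomp {cinema : List (List Int)} (hPre : ∀ row ∈ cinema, preRow row)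
    {m : Nat} (hm : m < cinema.length) (hz : (0 : Int) ∈ cinema[m])
    (hmax : ∀ j < cinema.length, (0 : Int) ∈ cinema.getD j [] →
      (cinema.getD j []).sum ≤ (cinema[m]).sum)
    (hfirst : ∀ j < m, (0 : Int) ∈ cinema.getD j [] →
      (cinema.getD j []).sum < (cinema[m]).sum) :
    order_of_seats_alt cinema
      = zp (m : Int) cinema[m] ++ order_of_seats_alt (cinema.set m (fillR cinema[m])) := by
  have hpm : preRow cinema[m] := fun s hs => hPre _ (List.getElem_mem hm) s hs
  set c₀ : Int := (cinema[m]).sum with hc₀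
  have hc0 : 0 ≤ c₀ := row_sum_nonneg hpm
  set cinema' : List (List Int) := cinema.set m (fillR cinema[m]) with hcin'
  -- all useful levels of either cinema lie at or below c₀
  have hEH : ∀ c, c₀ < c → emitL cinema c = [] := by
    intro c hc
    apply List.flatMap_eq_nil_iff.mpr
    intro p hp
    obtain ⟨k, hk, h1, h2⟩ := mem_enum hp
    rw [if_neg]
    rintro ⟨hsum, hzk⟩
    have := hmax k hk (by rwa [List.getD_eq_getElem _ _ hk, ← h2])
    rw [List.getD_eq_getElem _ _ hk, ← h2] at this
    omega
  have hEH' : ∀ c, c₀ < c → emitL cinema' c = [] := by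
    intro c hc
    apply List.flatMap_eq_nil_iff.mpr
    intro p hp
    obtain ⟨k, hk, h1, h2⟩ := mem_enum hp
    have hk' : k < cinema.length := by simpa [hcin'] using hk
    rw [if_neg]
    by_cases hkm : k = m
    · subst hkm
      have : p.2 = fillR cinema[k] := by
        rw [h2]
        simp [hcin', List.getElem_set_self]
      rintro ⟨_, hzk⟩
      rw [this] at hzk
      exact zero_not_mem_fillR _ hzk
    · have : p.2 = cinema[k] := by
        rw [h2]
        exact List.getElem_set_ne (by omega) _
      rintro ⟨hsum, hzk⟩
      rw [this] at hsum hzk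
      have := hmax k hk' (by rwa [List.getD_eq_getElem _ _ hk'])
      rw [List.getD_eq_getElem _ _ hk'] at this
      omega
  -- levels strictly below c₀ agree between the two cinemas
  have hAg : ∀ c, c ≠ c₀ → emitL cinema' c = emitL cinema c := by
    intro c hc
    apply emitL_set_of_agree hm
    rw [if_neg (by rintro ⟨hsum, _⟩; exact hc hsum.symm ), if_neg
      (by rintro ⟨_, hz'⟩; exact zero_not_mem_fillR _ hz')]
  -- c₀'s own level: the filled row's seats, then nothing from row m any more
  have hlen : (cinema.take m).length = m := by rw [List.length_take]; omega
  have hpre_nil : (PySem.List.enumerate (cinema.take m) 0).flatMap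
      (fun p => if p.2.sum = c₀ ∧ (0 : Int) ∈ p.2 then zp p.1 p.2 else []) = [] := by
    apply List.flatMap_eq_nil_iff.mpr
    intro p hp
    obtain ⟨k, hk, h1, h2⟩ := mem_enum hp
    have hk' : k < m := by
      rw [List.length_take] at hk
      omega
    have h2' : p.2 = cinema[k] := by rw [h2, List.getElem_take]
    rw [if_neg]
    rintro ⟨hsum, hzk⟩
    have := hfirst k hk' (by rwa [List.getD_eq_getElem _ _ (by omega), ← h2'])
    rw [List.getD_eq_getElem _ _ (by omega : k < cinema.length), ← h2'] at this
    omega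
  have hhead : emitL cinema c₀ = zp (m : Int) cinema[m] ++ emitL cinema' c₀ := by
    rw [hcin', set_split cinema m _ hm, emitL_append_cons]
    conv_lhs => rw [split_at cinema m hm, emitL_append_cons]
    rw [hlen, hpre_nil, if_pos ⟨rfl, hz⟩,
      if_neg (by rintro ⟨_, hz'⟩; exact zero_not_mem_fillR _ hz')]
    simp
  -- bring both sweeps to level c₀, then peel it off
  have hPre' : ∀ row ∈ cinema', preRow row := by
    intro r hrr
    rcases List.mem_or_eq_of_mem_set hrr with hrr' | hrr'
    · exact hPre r hrr'
    · rw [hrr']; exact preRow_fillR hpm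
  rw [alt_eq cinema, alt_eq cinema',
    flatRange_eq _ _ c₀ (by have := maxD_levels_nonneg hPre; omega) (by omega)
      (fun c hc => emitL_eq_nil_of_gt_max hc) hEH,
    flatRange_eq _ _ c₀ (by have := maxD_levels_nonneg hPre'; omega) (by omega)
      (fun c hc => emitL_eq_nil_of_gt_max hc) hEH',
    PySem.List.pyRange_neg_one_cons (by omega), List.flatMap_cons, List.flatMap_cons,
    hhead, List.flatMap_congr (fun c hc => hAg c (by
      have := PySem.List.mem_pyRange_neg_one.mp hc
      omega)),
    List.append_assoc]

lemma countP_set_lt {cinema : List (List Int)} {m : Nat} (hm : m < cinema.length)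
    {y : List Int} (hold : (0 : Int) ∈ cinema[m]) (hnew : (0 : Int) ∉ y) :
    (cinema.set m y).countP (fun r => decide ((0 : Int) ∈ r)) + 1
      = cinema.countP (fun r => decide ((0 : Int) ∈ r)) := by
  induction cinema generalizing m with
  | nil => simp at hm
  | cons r rest ih =>
    cases m with
    | zero =>
      simp only [List.set_cons_zero, List.countP_cons]
      have h0 : (0 : Int) ∈ r := by simpa using hold
      simp [h0, hnew]
    | succ m =>
      have hm' : m < rest.length := by simpa using hm
      have hold' : (0 : Int) ∈ rest[m] := by simpa using hold
      simp only [List.set_cons_succ, List.countP_cons]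
      have := ih hm' hold'
      omega

lemma alt_nil {cinema : List (List Int)} (h : ∀ row ∈ cinema, (0 : Int) ∉ row) :
    order_of_seats_alt cinema = [] := by
  simp only [order_of_seats_alt]
  apply List.flatMap_eq_nil_iff.mpr
  intro c _
  apply List.flatMap_eq_nil_iff.mpr
  intro p hp
  obtain ⟨k, hk, _, h2⟩ := mem_enum hp
  have : (0 : Int) ∉ p.2 := by rw [h2]; exact h _ (List.getElem_mem hk)
  rw [if_neg (by tauto)]

lemma oosLoop_eq {k : Nat} : ∀ (cinema : List (List Int)) (order : List (Int × Int)),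
    (∀ row ∈ cinema, preRow row) →
    cinema.countP (fun r => decide ((0 : Int) ∈ r)) ≤ k →
    oosLoop (k + 1) cinema order = order ++ order_of_seats_alt cinema := by
  induction k with
  | zero =>
    intro cinema order hPre hcnt
    have hnone : ∀ row ∈ cinema, (0 : Int) ∉ row := by
      intro row hr hz
      have h0 : cinema.countP (fun r => decide ((0 : Int) ∈ r)) = 0 := Nat.le_zero.mp hcnt
      have := List.countP_eq_zero.mp h0 row hr
      simp [hz] at this
    have hE : haveEmptySeats cinema = false := by
      rw [← Bool.not_eq_true]
      intro hc
      obtain ⟨row, hr, hz⟩ := (haveEmptySeats_iff cinema).mp hc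
      exact hnone row hr hz
    rw [oosLoop, hE, alt_nil hnone, List.append_nil]
    simp
  | succ k ih =>
    intro cinema order hPre hcnt
    by_cases hE : haveEmptySeats cinema = true
    · obtain ⟨row, hr, hz⟩ := (haveEmptySeats_iff cinema).mp hE
      obtain ⟨j0, hj0, hrow⟩ := List.mem_iff_getElem.mp hr
      have hex : ∃ j, ∃ _ : j < cinema.length, (0 : Int) ∈ cinema.getD j [] :=
        ⟨j0, hj0, by rw [List.getD_eq_getElem _ _ hj0, hrow]; exact hz⟩
      obtain ⟨m, hRT, hm, hzm, hmax, hfirst⟩ := rowToFill_spec hPre hex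
      have hzm' : (0 : Int) ∈ cinema[m] := by rwa [List.getD_eq_getElem _ _ hm] at hzm
      have hget : PySem.List.pyGetD cinema (rowToFill cinema) [] = cinema[m] := by
        rw [hRT, PySem.List.pyGetD_natCast, List.getD_eq_getElem _ _ hm]
      have hfill := fillRowA_eq (rowToFill cinema) cinema[m] 0
      have hset : PySem.List.pySetD cinema (rowToFill cinema) (fillR cinema[m])
          = cinema.set m (fillR cinema[m]) := by
        rw [hRT, PySem.List.pySetD_natCast]
      have hPre' : ∀ row ∈ cinema.set m (fillR cinema[m]), preRow row := by
        intro r hrr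
        rcases List.mem_or_eq_of_mem_set hrr with hrr' | hrr'
        · exact hPre r hrr'
        · rw [hrr']; exact preRow_fillR (fun s hs => hPre _ (List.getElem_mem hm) s hs)
      have hcnt' : (cinema.set m (fillR cinema[m])).countP (fun r => decide ((0 : Int) ∈ r)) ≤ k := by
        have := countP_set_lt hm (y := fillR cinema[m]) hzm' (zero_not_mem_fillR _)
        omega
      rw [show k + 1 + 1 = (k + 1) + 1 from rfl, oosLoop, hE]
      simp only [hget, hfill, hset]
      rw [ih _ _ hPre' hcnt',
        alt_decomp hPre hm hzm' (by rw [← List.getD_eq_getElem _ _ hm]; exact hmax)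
          (by rw [← List.getD_eq_getElem _ _ hm]; exact hfirst),
        zp, hRT, List.append_assoc]
      simp
    · have hnone : ∀ row ∈ cinema, (0 : Int) ∉ row := by
        intro row hr hz
        exact absurd ((haveEmptySeats_iff cinema).mpr ⟨row, hr, hz⟩) hE
      rw [oosLoop, Bool.not_eq_true _ |>.mp hE, alt_nil hnone, List.append_nil]
      simp

-- ===== VERDICT (by name: the statement is the Claim_ definition above) =====
theorem order_of_seats_spec : Claim_equal_order_of_seats := by
  intro cinema _ hPre
  unfold Spec_order_of_seats order_of_seats
  rcases hPre with hPre | hnone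
  · have h := oosLoop_eq (k := cinema.length) cinema [] hPre (by
      simpa using List.countP_le_length (l := cinema) (p := fun r => decide ((0 : Int) ∈ r)))
    simpa using h
  · have hE : haveEmptySeats cinema = false := by
      rw [← Bool.not_eq_true]
      intro hc
      obtain ⟨row, hr, hz⟩ := (haveEmptySeats_iff cinema).mp hc
      exact hnone row hr hz
    rw [oosLoop, hE, alt_nil hnone]
    simp
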